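-- pv_equiv track=rewrite | github.com/SuperLiVLi/NeuroMesh- | q1.py | minNum
-- ===== SOURCE A (Python) =====
-- def minNum(source, target):
--     for char in target:
--         if char not in source:
--             return -1
--
--     count, i, j=0,0,0
--
--     while j<len(target):
--         count+=1
--         i=0
--         while i<len(source) and j<len(target):
--             if source[i]==target[j]:
--                 j+=1
--             i+=1
--
--     return count
-- ===== SOURCE B (Python) =====
-- def minNum(source, target):
--     # index every char of source once, then greedily binary-search the next
--     # occurrence at-or-after the current position for each target char
--     pos = {}
--     k = 0
--     for c in source:
--         pos.setdefault(c, []).append(k)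
--         k += 1
--     if not target:
--         return 0
--     count, i = 1, 0
--     for c in target:
--         lst = pos.get(c)
--         if lst is None:
--             return -1
--         # first index in lst whose value is >= i (hand-rolled bisect_left)
--         lo, hi = 0, len(lst)
--         while lo < hi:
--             mid = (lo + hi) // 2
--             if lst[mid] < i:
--                 lo = mid + 1
--             else:
--                 hi = mid
--         if lo == len(lst):
--             count += 1
--             i = lst[0] + 1
--         else:
--             i = lst[lo] + 1
--     return count
-- ===== Notes on version B (the rewrite author's own statement) =====
-- stated objective: alternative
-- what changed: Instead of rescanning the whole source once per pass of an outer while-loop, B builds a per-character sorted index list once and binary-searches the next occurrence at-or-after the current position for each target character.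
import Mathlib
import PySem

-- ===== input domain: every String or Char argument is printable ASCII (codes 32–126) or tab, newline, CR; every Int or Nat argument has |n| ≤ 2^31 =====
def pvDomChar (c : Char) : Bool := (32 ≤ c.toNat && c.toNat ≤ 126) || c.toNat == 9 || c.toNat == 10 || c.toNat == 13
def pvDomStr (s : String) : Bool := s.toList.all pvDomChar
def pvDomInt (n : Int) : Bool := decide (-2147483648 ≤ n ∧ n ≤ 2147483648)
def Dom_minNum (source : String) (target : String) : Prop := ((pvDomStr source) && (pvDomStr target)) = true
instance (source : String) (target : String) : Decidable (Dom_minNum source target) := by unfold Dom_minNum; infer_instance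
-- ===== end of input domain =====

-- B replaces A's repeated full scans of source by a one-time per-character index
-- and a binary search for the next occurrence; return values agree everywhere.

-- ===== PORT A =====
-- inner while: scan source from i, advancing j on matches
def innerA (s t : List Char) (i j : Nat) : Nat :=
  if h : i < s.length ∧ j < t.length then
    if s[i]'h.1 = t[j]'h.2 then innerA s t (i+1) (j+1) else innerA s t (i+1) j
  else j
termination_by s.length - i
decreasing_by all_goals omega

-- outer while (fuel only totalizes; with all target chars present each pass advances j)
def outerA (s t : List Char) (fuel : Nat) (count : Int) (j : Nat) : Int :=
  if j < t.length then
    match fuel with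
    | 0 => count
    | f+1 => outerA s t f (count+1) (innerA s t 0 j)
  else count

def minNum (source : String) (target : String) : Int :=
  let s := source.toList
  let t := target.toList
  -- `for char in target: if char not in source: return -1`
  if t.all (fun c => s.contains c) then outerA s t t.length 0 0 else -1

-- ===== PORT B =====
-- `pos.setdefault(c, []).append(k)` = store previous list (default []) with k appended
def buildPos : List Char → Nat → PySem.Dict Char (List Nat) → PySem.Dict Char (List Nat)
  | [], _, d => d
  | c :: rest, k, d => buildPos rest (k+1) (d.insert c (d.getD c [] ++ [k]))

-- hand-rolled bisect_left of Source B (fuel ≥ hi - lo only totalizes the while loop,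
-- which shrinks the interval by at least one each iteration)
def blAux (a : List Nat) (x : Nat) : Nat → Nat → Nat → Nat
  | 0, lo, _ => lo
  | fuel+1, lo, hi =>
    if lo < hi then
      let mid := (lo + hi) / 2
      if a.getD mid 0 < x then blAux a x fuel (mid+1) hi else blAux a x fuel lo mid
    else lo

def bisectLeft (a : List Nat) (x : Nat) (lo hi : Nat) : Nat := blAux a x (hi - lo) lo hi

def bLoop (d : PySem.Dict Char (List Nat)) : List Char → Int → Nat → Int
  | [], count, _ => count
  | c :: rest, count, i =>
    match d.get? c with
    | none => -1
    | some lst =>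
      let k := bisectLeft lst i 0 lst.length
      if k = lst.length then bLoop d rest (count+1) (lst.getD 0 0 + 1)
      else bLoop d rest count (lst.getD k 0 + 1)

def minNum_alt (source : String) (target : String) : Int :=
  let s := source.toList
  let t := target.toList
  let d := buildPos s 0 PySem.Dict.empty
  if t = [] then 0 else bLoop d t 1 0

-- ===== PRECONDITION & SPEC =====
def Spec_minNum (source : String) (target : String) (out : Int) : Prop := out = minNum_alt source target
instance (source : String) (target : String) (out : Int) : Decidable (Spec_minNum source target out) := by unfold Spec_minNum; infer_instance

-- ===== CLAIM (what is proved, stated in full; the proofs are below) =====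
def Claim_equal_minNum : Prop := ∀ (source : String) (target : String), Dom_minNum source target → Spec_minNum source target (minNum source target)

-- ===== LEMMAS AND PROOFS =====

-- indices (offset by k) of occurrences of c in s, in increasing order
def occ : List Char → Nat → Char → List Nat
  | [], _, _ => []
  | a :: rest, k, c => if a = c then k :: occ rest (k+1) c else occ rest (k+1) c

-- first index ≥ i holding c
def ff : List Char → Char → Nat → Option Nat
  | [], _, _ => none
  | a :: rest, c, 0 => if a = c then some 0 else (ff rest c 0).map (· + 1)
  | _ :: rest, c, (i+1) => (ff rest c i).map (· + 1)

-- common greedy reference: per target char, next occurrence at-or-after i, else restart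
def greedyL (s : List Char) : List Char → Nat → Int → Int
  | [], _, count => count
  | c :: rest, i, count =>
    match ff s c i with
    | some k => greedyL s rest (k+1) count
    | none =>
      match ff s c 0 with
      | some k => greedyL s rest (k+1) (count+1)
      | none => -1

theorem occ_shift (s : List Char) (c : Char) : ∀ k, occ s (k+1) c = (occ s k c).map (· + 1) := by
  induction s with
  | nil => intro k; rfl
  | cons a rest ih =>
    intro k
    simp only [occ]
    by_cases h : a = c <;> simp [h, ih (k+1)]


theorem occ_eq_nil_iff (s : List Char) (c : Char) : ∀ k, (occ s k c = [] ↔ c ∉ s) := by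
  induction s with
  | nil => intro k; simp [occ]
  | cons a rest ih =>
    intro k
    simp only [occ]
    by_cases h : a = c
    · subst h; simp
    · simp only [h, if_false, ih (k+1), List.mem_cons]
      constructor
      · rintro hn (rfl | hm)
        · exact h rfl
        · exact hn hm
      · intro hn hm
        exact hn (Or.inr hm)


theorem occ_lb (s : List Char) (c : Char) : ∀ k m, m ∈ occ s k c → k ≤ m := by
  induction s with
  | nil => intro k m hm; simp [occ] at hm
  | cons a rest ih =>
    intro k m hm
    simp only [occ] at hm
    by_cases h : a = c
    · simp [h] at hm
      rcases hm with rfl | hm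
      · exact le_refl _
      · exact le_of_lt (lt_of_lt_of_le (Nat.lt_succ_self k) (ih (k+1) m hm))
    · simp [h] at hm
      exact le_of_lt (lt_of_lt_of_le (Nat.lt_succ_self k) (ih (k+1) m hm))


theorem occ_sorted (s : List Char) (c : Char) : ∀ k, (occ s k c).Pairwise (· < ·) := by
  induction s with
  | nil => intro k; simp [occ]
  | cons a rest ih =>
    intro k
    simp only [occ]
    by_cases h : a = c
    · simp only [h, if_true]
      exact List.Pairwise.cons (fun m hm => lt_of_lt_of_le (Nat.lt_succ_self k) (occ_lb rest c (k+1) m hm)) (ih (k+1))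
    · simp [h, ih (k+1)]


theorem find?_ext {α : Type} {p q : α → Bool} : ∀ (l : List α), (∀ x ∈ l, p x = q x) → l.find? p = l.find? q := by
  intro l
  induction l with
  | nil => intro _; rfl
  | cons a rest ih =>
    intro h
    by_cases ha : p a = true
    · rw [List.find?_cons_of_pos ha, List.find?_cons_of_pos (by rw [← h a (by simp)]; exact ha)]
    · rw [List.find?_cons_of_neg (by simpa using ha),
        List.find?_cons_of_neg (by rw [← h a (by simp)]; simpa using ha),
        ih (fun x hx => h x (by simp [hx]))]

theorem ff_key (s : List Char) (c : Char) : ∀ i, ff s c i = (occ s 0 c).find? (fun m => decide (i ≤ m)) := by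
  induction s with
  | nil => intro i; rfl
  | cons a rest ih =>
    intro i
    have shift : occ rest 1 c = (occ rest 0 c).map (· + 1) := occ_shift rest c 0
    match i with
    | 0 =>
      simp only [ff, occ]
      by_cases h : a = c
      · simp [h]
      · rw [if_neg h, if_neg h, shift, List.find?_map, ih 0]
        exact congrArg _ (find?_ext _ (by intro x _; simp))
    | i+1 =>
      simp only [ff, occ]
      by_cases h : a = c
      · rw [if_pos h, shift, List.find?_cons_of_neg (by simp), List.find?_map, ih i]
        exact congrArg _ (find?_ext _ (by intro x _; simp [Function.comp]))
      · rw [if_neg h, shift, List.find?_map, ih i]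
        exact congrArg _ (find?_ext _ (by intro x _; simp [Function.comp]))

theorem ff_zero (s : List Char) (c : Char) : ff s c 0 = (occ s 0 c).head? := by
  rw [ff_key]
  induction occ s 0 c with
  | nil => rfl
  | cons a l ih => simp


theorem ff_none_of_ge (s : List Char) (c : Char) : ∀ i, s.length ≤ i → ff s c i = none := by
  induction s with
  | nil => intro i _; rfl
  | cons a rest ih =>
    intro i hi
    match i, hi with
    | i+1, hi =>
      simp only [ff, ih i (by simpa using hi), Option.map_none]


theorem ff_hit (s : List Char) (c : Char) : ∀ i, (h : i < s.length) → s[i] = c → ff s c i = some i := by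
  induction s with
  | nil => intro i h; simp at h
  | cons a rest ih =>
    intro i h he
    match i with
    | 0 => simp only [ff]; simp at he; simp [he]
    | i+1 =>
      simp only [ff]
      rw [ih i (by simpa using h) (by simpa using he)]
      rfl


theorem ff_skip (s : List Char) (c : Char) : ∀ i, (h : i < s.length) → s[i] ≠ c → ff s c i = ff s c (i+1) := by
  induction s with
  | nil => intro i h; simp at h
  | cons a rest ih =>
    intro i h he
    match i with
    | 0 =>
      simp only [ff]
      simp only [List.getElem_cons_zero] at he
      rw [if_neg he]
    | i+1 =>
      simp only [ff]
      rw [ih i (by simpa using h) (by simpa using he)]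


theorem blAux_inv (lst : List Nat) (x : Nat) (hs : lst.Pairwise (· < ·)) :
    ∀ fuel lo hi, hi - lo ≤ fuel → lo ≤ hi → hi ≤ lst.length →
    (∀ m, m < lo → lst.getD m 0 < x) → (∀ m, hi ≤ m → m < lst.length → ¬ lst.getD m 0 < x) →
    blAux lst x fuel lo hi ≤ lst.length ∧
    (∀ m, m < blAux lst x fuel lo hi → lst.getD m 0 < x) ∧
    (∀ m, blAux lst x fuel lo hi ≤ m → m < lst.length → ¬ lst.getD m 0 < x) := by
  have hmono : ∀ p q, p < q → q < lst.length → lst.getD p 0 < lst.getD q 0 := by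
    intro p q hpq hq
    have hp : p < lst.length := lt_trans hpq hq
    rw [List.getD_eq_getElem lst 0 hp, List.getD_eq_getElem lst 0 hq]
    exact (List.pairwise_iff_getElem.mp hs) p q hp hq hpq
  intro fuel
  induction fuel with
  | zero =>
    intro lo hi hf hlo hhi hbelow habove
    simp only [blAux]
    exact ⟨by omega, fun m hm => hbelow m hm, fun m hm hml => habove m (by omega) hml⟩
  | succ f ih =>
    intro lo hi hf hlo hhi hbelow habove
    by_cases h : lo < hi
    · rw [blAux, if_pos h]
      simp only
      by_cases hlt : lst.getD ((lo + hi) / 2) 0 < x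
      · rw [if_pos hlt]
        refine ih ((lo+hi)/2+1) hi (by omega) (by omega) hhi ?_ habove
        intro m hm
        rcases Nat.lt_or_ge m ((lo+hi)/2) with hc | hc
        · exact lt_trans (hmono m ((lo+hi)/2) hc (by omega)) hlt
        · have : m = (lo+hi)/2 := by omega
          rw [this]; exact hlt
      · rw [if_neg hlt]
        refine ih lo ((lo+hi)/2) (by omega) (by omega) (by omega) hbelow ?_
        intro m hm hmlen
        rcases Nat.lt_or_ge m ((lo+hi)/2+1) with hc | hc
        · have : m = (lo+hi)/2 := by omega
          rw [this]; exact hlt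
        · intro hx
          exact hlt (lt_trans (hmono ((lo+hi)/2) m (by omega) hmlen) hx)
    · rw [blAux, if_neg h]
      have : lo = hi := by omega
      exact ⟨by omega, fun m hm => hbelow m hm, fun m hm hml => habove m (by omega) hml⟩

theorem bl_inv (lst : List Nat) (x : Nat) (hs : lst.Pairwise (· < ·)) :
    ∀ lo hi, lo ≤ hi → hi ≤ lst.length →
    (∀ m, m < lo → lst.getD m 0 < x) → (∀ m, hi ≤ m → m < lst.length → ¬ lst.getD m 0 < x) →
    bisectLeft lst x lo hi ≤ lst.length ∧
    (∀ m, m < bisectLeft lst x lo hi → lst.getD m 0 < x) ∧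
    (∀ m, bisectLeft lst x lo hi ≤ m → m < lst.length → ¬ lst.getD m 0 < x) := by
  intro lo hi hlo hhi hbelow habove
  exact blAux_inv lst x hs (hi - lo) lo hi (le_refl _) hlo hhi hbelow habove

theorem find?_of_firstIdx {α : Type} (p : α → Bool) (d : α) :
    ∀ (lst : List α) (r : Nat), r ≤ lst.length →
    (∀ m, m < r → p (lst.getD m d) = false) → (∀ m, r ≤ m → m < lst.length → p (lst.getD m d) = true) →
    lst.find? p = (if r < lst.length then some (lst.getD r d) else none) := by
  intro lst
  induction lst with
  | nil => intro r _ _ _; simp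
  | cons a rest ih =>
    intro r hr hlt hge
    match r with
    | 0 =>
      have ha : p a = true := by
        have := hge 0 (le_refl _) (by simp)
        simpa using this
      rw [List.find?_cons_of_pos ha]
      simp
    | r+1 =>
      have ha : p a = false := by
        have := hlt 0 (by omega)
        simpa using this
      rw [List.find?_cons_of_neg (by simp [ha])]
      rw [ih r (by simpa using hr) (fun m hm => hlt (m+1) (by omega)) (fun m hm hml => hge (m+1) (by omega) (by simpa using hml))]
      simp only [List.length_cons, List.getD_cons_succ]
      by_cases hc : r < rest.length
      · rw [if_pos hc, if_pos (by omega)]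
      · rw [if_neg hc, if_neg (by omega)]


theorem bisect_ff (s : List Char) (c : Char) (i : Nat) :
    ff s c i = (if bisectLeft (occ s 0 c) i 0 (occ s 0 c).length < (occ s 0 c).length
                then some ((occ s 0 c).getD (bisectLeft (occ s 0 c) i 0 (occ s 0 c).length) 0) else none) := by
  have hso := occ_sorted s c 0
  obtain ⟨hle, hbelow, habove⟩ := bl_inv (occ s 0 c) i hso 0 (occ s 0 c).length (by omega) (le_refl _) (by omega) (by omega)
  rw [ff_key]
  exact find?_of_firstIdx (fun m => decide (i ≤ m)) 0 (occ s 0 c) _ hle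
    (fun m hm => by simpa using Nat.not_le.mpr (hbelow m hm))
    (fun m hm hml => by simpa using Nat.not_lt.mp (fun hlt => habove m hm hml hlt))


theorem buildPos_get? : ∀ (rest : List Char) (k : Nat) (d : PySem.Dict Char (List Nat)) (c : Char),
    (buildPos rest k d).get? c =
      (match d.get? c with
       | none => if occ rest k c = [] then none else some (occ rest k c)
       | some l => some (l ++ occ rest k c)) := by
  intro rest
  induction rest with
  | nil =>
    intro k d c
    simp only [buildPos, occ]
    match h : d.get? c with
    | none => simp
    | some l => simp
  | cons a r ih =>
    intro k d c
    simp only [buildPos, occ]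
    rw [ih]
    by_cases hca : c = a
    · subst hca
      rw [PySem.Dict.get?_insert_self]
      rw [PySem.Dict.getD_eq_get?_getD]
      match h : d.get? c with
      | none => simp
      | some l => simp
    · rw [PySem.Dict.get?_insert_of_ne _ _ hca]
      have hocc : (if a = c then k :: occ r (k+1) c else occ r (k+1) c) = occ r (k+1) c := by
        rw [if_neg (fun h => hca h.symm)]
      rw [hocc]

theorem build_get? (s : List Char) (c : Char) :
    (buildPos s 0 PySem.Dict.empty).get? c = (if occ s 0 c = [] then none else some (occ s 0 c)) := by
  rw [buildPos_get?]
  simp [PySem.Dict.get?_empty]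


theorem bLoop_eq (s : List Char) : ∀ (cs : List Char) (count : Int) (i : Nat),
    bLoop (buildPos s 0 PySem.Dict.empty) cs count i = greedyL s cs i count := by
  intro cs
  induction cs with
  | nil => intro count i; rfl
  | cons c rest ih =>
    intro count i
    simp only [bLoop, greedyL]
    rw [build_get?]
    by_cases hocc : occ s 0 c = []
    · rw [if_pos hocc]
      rw [bisect_ff s c i, bisect_ff s c 0, hocc]
      simp
    · rw [if_neg hocc]
      simp only
      have hk := bisect_ff s c i
      by_cases hlt : bisectLeft (occ s 0 c) i 0 (occ s 0 c).length < (occ s 0 c).length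
      · rw [if_pos hlt] at hk
        rw [hk]
        rw [if_neg (by omega)]
        exact ih count _
      · rw [if_neg hlt] at hk
        rw [hk]
        obtain ⟨hle, _, _⟩ := bl_inv (occ s 0 c) i (occ_sorted s c 0) 0 (occ s 0 c).length (by omega) (le_refl _) (by omega) (by omega)
        rw [if_pos (by omega)]
        rw [ff_zero]
        match hm : occ s 0 c with
        | [] => exact absurd hm hocc
        | a :: l =>
          simp only [List.head?_cons, List.getD_cons_zero]
          exact ih (count+1) _


theorem innerA_ge (s t : List Char) : ∀ i j, j ≤ innerA s t i j := by
  intro i j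
  induction i, j using innerA.induct s t with
  | case1 i j h heq ih => rw [innerA, dif_pos h, if_pos heq]; omega
  | case2 i j h heq ih => rw [innerA, dif_pos h, if_neg heq]; omega
  | case3 i j h => rw [innerA, dif_neg h]



theorem inner_step (s t : List Char) : ∀ i j, (hj : j < t.length) →
    innerA s t i j = (match ff s (t[j]'hj) i with
                      | none => j
                      | some k => innerA s t (k+1) (j+1)) := by
  intro i j
  induction i, j using innerA.induct s t with
  | case1 i j h heq ih =>
    intro hj
    rw [innerA, dif_pos h, if_pos heq]
    rw [ff_hit s (t[j]'hj) i h.1 heq]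
  | case2 i j h heq ih =>
    intro hj
    rw [innerA, dif_pos h, if_neg heq]
    rw [ff_skip s (t[j]'hj) i h.1 heq]
    exact ih hj
  | case3 i j h =>
    intro hj
    have hi : s.length ≤ i := by
      by_contra hc
      exact h ⟨by omega, hj⟩
    rw [innerA, dif_neg h]
    rw [ff_none_of_ge s _ i hi]


theorem inner_greedy (s t : List Char) (pres : ∀ c ∈ t, c ∈ s) :
    ∀ j i (count' : Int), j ≤ t.length →
    greedyL s (t.drop j) i count' =
      (if innerA s t i j < t.length then greedyL s (t.drop (innerA s t i j)) 0 (count'+1) else count') := by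
  have H : ∀ n j i (count' : Int), t.length - j = n → j ≤ t.length →
      greedyL s (t.drop j) i count' =
        (if innerA s t i j < t.length then greedyL s (t.drop (innerA s t i j)) 0 (count'+1) else count') := by
    intro n
    induction n using Nat.strong_induction_on with
    | _ n ih =>
      intro j i count' hn hj
      rcases Nat.lt_or_ge j t.length with hjlt | hjge
      · -- j < t.length
        have hdrop : t.drop j = t[j] :: t.drop (j+1) := List.drop_eq_getElem_cons hjlt
        rw [inner_step s t i j hjlt]
        match hf : ff s (t[j]'hjlt) i with
        | some k =>
          rw [hdrop]
          simp only [greedyL, hf]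
          exact ih (t.length - (j+1)) (by omega) (j+1) (k+1) count' rfl (by omega)
        | none =>
          have hmem : (t[j]'hjlt) ∈ s := pres _ (List.getElem_mem hjlt)
          have hocc : occ s 0 (t[j]'hjlt) ≠ [] := by
            rw [ne_eq, occ_eq_nil_iff]
            simp [hmem]
          have hff0 : ∃ k0, ff s (t[j]'hjlt) 0 = some k0 := by
            rw [ff_zero]
            match hm : occ s 0 (t[j]'hjlt) with
            | [] => exact absurd hm hocc
            | a :: l => exact ⟨a, rfl⟩
          obtain ⟨k0, hk0⟩ := hff0
          rw [if_pos hjlt, hdrop]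
          simp only [greedyL, hf, hk0]
      · -- j = t.length
        have hje : j = t.length := by omega
        have hinner : innerA s t i j = j := by
          rw [innerA, dif_neg (by omega)]
        rw [hinner, if_neg (by omega), hje, List.drop_length]
        rfl
  intro j i count' hj
  exact H (t.length - j) j i count' rfl hj


theorem outer_greedy (s t : List Char) (pres : ∀ c ∈ t, c ∈ s) :
    ∀ fuel (count : Int) j, j < t.length → t.length - j ≤ fuel →
    outerA s t fuel count j = greedyL s (t.drop j) 0 (count+1) := by
  intro fuel
  induction fuel with
  | zero => intro count j hj hf; omega
  | succ f ihf =>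
    intro count j hj hf
    rw [outerA, if_pos hj]
    have hstep := inner_greedy s t pres j 0 (count+1) (by omega)
    set j' := innerA s t 0 j with hj'
    rcases Nat.lt_or_ge j' t.length with hlt | hge
    · rw [hstep, if_pos hlt]
      have hprog : j < j' := by
        have hjm : (t[j]'hj) ∈ s := pres _ (List.getElem_mem hj)
        have hocc : occ s 0 (t[j]'hj) ≠ [] := by
          rw [ne_eq, occ_eq_nil_iff]; simp [hjm]
        have hff0 : ∃ k0, ff s (t[j]'hj) 0 = some k0 := by
          rw [ff_zero]
          match hm : occ s 0 (t[j]'hj) with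
          | [] => exact absurd hm hocc
          | a :: l => exact ⟨a, rfl⟩
        obtain ⟨k0, hk0⟩ := hff0
        have hstep2 := inner_step s t 0 j hj
        rw [hk0] at hstep2
        simp only at hstep2
        rw [hj', hstep2]
        have := innerA_ge s t (k0+1) (j+1)
        omega
      rw [ihf (count+1) j' hlt (by omega)]
    · rw [hstep, if_neg (by omega)]
      cases f <;> rw [outerA, if_neg (by omega)]


theorem greedy_missing (s : List Char) : ∀ (cs : List Char) i (count : Int),
    (∃ c ∈ cs, c ∉ s) → greedyL s cs i count = -1 := by
  intro cs
  induction cs with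
  | nil => intro i count h; simp at h
  | cons c rest ih =>
    intro i count h
    simp only [greedyL]
    by_cases hc : c ∈ s
    · have hrest : ∃ c' ∈ rest, c' ∉ s := by
        rcases h with ⟨c', hc', hns⟩
        rcases List.mem_cons.mp hc' with rfl | hm
        · exact absurd hc hns
        · exact ⟨c', hm, hns⟩
      have hocc : occ s 0 c ≠ [] := by
        rw [ne_eq, occ_eq_nil_iff]; simp [hc]
      have hff0 : ∃ k0, ff s c 0 = some k0 := by
        rw [ff_zero]
        match hm : occ s 0 c with
        | [] => exact absurd hm hocc
        | a :: l => exact ⟨a, rfl⟩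
      obtain ⟨k0, hk0⟩ := hff0
      match hf : ff s c i with
      | some k => exact ih _ _ hrest
      | none => rw [hk0]; exact ih _ _ hrest
    · have hocc : occ s 0 c = [] := (occ_eq_nil_iff s c 0).mpr hc
      have hffi : ff s c i = none := by
        rw [ff_key, hocc]; rfl
      have hff0 : ff s c 0 = none := by
        rw [ff_key, hocc]; rfl
      rw [hffi, hff0]


-- ===== VERDICT (by name: the statement is the Claim_ definition above) =====
theorem minNum_spec : Claim_equal_minNum := by
  intro source target _dom
  unfold Spec_minNum minNum minNum_alt
  simp only
  set s := source.toList with hs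
  set t := target.toList with ht
  by_cases hall : t.all (fun c => s.contains c)
  · rw [if_pos hall]
    have pres : ∀ c ∈ t, c ∈ s := by
      intro c hc
      have := List.all_eq_true.mp hall c hc
      simpa using this
    by_cases hte : t = []
    · rw [if_pos hte, hte]
      rw [outerA.eq_def]
      simp
    · rw [if_neg hte]
      have hlen : 0 < t.length := List.length_pos_iff.mpr hte
      rw [outer_greedy s t pres t.length 0 0 hlen (by omega)]
      rw [List.drop_zero, bLoop_eq]
      norm_num
  · rw [if_neg hall]
    have hmiss : ∃ c ∈ t, c ∉ s := by
      simpa using hall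
    have hte : t ≠ [] := by
      rcases hmiss with ⟨c, hc, _⟩
      intro h
      rw [h] at hc
      simp at hc
    rw [if_neg hte, bLoop_eq, greedy_missing s t 0 1 hmiss]
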